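-- pv_equiv track=rewrite | github.com/westernflyer/logger2gpx | logger2gpx.py | _subsample_last
-- ===== SOURCE A (Python) =====
-- def _subsample_last(data, interval):
--     """Take the last point in each interval."""
--     if not data:
--         return data
--
--     subsampled = []
--     start_time = data[0][0]
--
--     # Group data by intervals
--     intervals = {}
--     for row in data:
--         timestamp = row[0]
--         interval_index = (timestamp - start_time) // interval
--         intervals[interval_index] = row  # This will keep the last one for each interval
--
--     # Sort by interval index and return
--     for interval_index in sorted(intervals.keys()):
--         subsampled.append(intervals[interval_index])
--
--     return subsampled
-- ===== SOURCE B (Python) =====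
-- def _subsample_last(data, interval):
--     """Take the last point in each interval."""
--     if not data:
--         return data
--     start_time = data[0][0]
--     # single pass maintaining an association list sorted by interval index;
--     # replace-in-place keeps the LAST row for each index, matching dict overwrite
--     acc = []  # list of (interval_index, row), strictly increasing indices
--     for row in data:
--         key = (row[0] - start_time) // interval
--         i = 0
--         while i < len(acc) and acc[i][0] < key:
--             i += 1
--         if i < len(acc) and acc[i][0] == key:
--             acc[i] = (key, row)
--         else:
--             acc.insert(i, (key, row))
--     return [row for _, row in acc]
-- ===== Notes on version B (the rewrite author's own statement) =====
-- stated objective: alternative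
-- what changed: Replaces A's dict-then-sort-keys two-phase grouping by a single pass that maintains a sorted association list of interval indices, inserting or replacing in place so no final sort is needed.
import Mathlib
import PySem

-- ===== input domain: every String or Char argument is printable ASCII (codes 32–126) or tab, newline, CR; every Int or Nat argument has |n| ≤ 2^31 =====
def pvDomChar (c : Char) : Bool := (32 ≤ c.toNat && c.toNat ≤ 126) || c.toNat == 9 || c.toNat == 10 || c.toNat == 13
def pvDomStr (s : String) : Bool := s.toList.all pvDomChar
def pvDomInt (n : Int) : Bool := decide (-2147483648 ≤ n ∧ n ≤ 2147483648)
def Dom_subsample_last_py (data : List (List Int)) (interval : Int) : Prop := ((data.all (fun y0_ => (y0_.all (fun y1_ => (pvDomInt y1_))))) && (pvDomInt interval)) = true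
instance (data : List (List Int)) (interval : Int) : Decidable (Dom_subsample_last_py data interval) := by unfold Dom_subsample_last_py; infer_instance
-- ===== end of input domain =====

-- B replaces A's dict-grouping + final key sort by one pass over a sorted association list (alternative decomposition, same values).

-- ===== PORT A =====
-- data[0][0] and row[0] are ported with pyGetD default 0/[]: exact because Pre_ guarantees every row is nonempty;
-- intervals[k] in the output loop is ported with getD []: exact because k is always a key of the dict.
def subsample_last_py (data : List (List Int)) (interval : Int) : List (List Int) :=
  if data = [] then data
  else
    let start_time := PySem.List.pyGetD (PySem.List.pyGetD data 0 []) 0 0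
    let intervals := data.foldl
      (fun (d : PySem.Dict Int (List Int)) row =>
        d.insert (PySem.Int.floordiv (PySem.List.pyGetD row 0 0 - start_time) interval) row)
      PySem.Dict.empty
    (PySem.List.sorted intervals.keys (fun x => x) false).foldl
      (fun acc k => acc ++ [intervals.getD k []]) []

-- ===== PORT B =====
-- the body of B's while/replace/insert step: skip entries with smaller index, then replace or insert
def pvInsB (key : Int) (row : List Int) : List (Int × List Int) → List (Int × List Int)
  | [] => [(key, row)]
  | (k, r) :: rest =>
    if k < key then (k, r) :: pvInsB key row rest
    else if k = key then (key, row) :: rest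
    else (key, row) :: (k, r) :: rest

def subsample_last_py_alt (data : List (List Int)) (interval : Int) : List (List Int) :=
  if data = [] then data
  else
    let start_time := PySem.List.pyGetD (PySem.List.pyGetD data 0 []) 0 0
    (data.foldl
      (fun acc row =>
        pvInsB (PySem.Int.floordiv (PySem.List.pyGetD row 0 0 - start_time) interval) row acc)
      []).map (·.2)

-- ===== PRECONDITION & SPEC =====
-- Pre_ excludes exactly the inputs where A raises: interval = 0 (ZeroDivisionError) or an empty row
-- (IndexError), both only reachable when data is nonempty.
def Pre_subsample_last_py (data : List (List Int)) (interval : Int) : Prop :=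
  data = [] ∨ (interval ≠ 0 ∧ ∀ row ∈ data, row ≠ [])
instance (data : List (List Int)) (interval : Int) : Decidable (Pre_subsample_last_py data interval) := by
  unfold Pre_subsample_last_py; infer_instance

def pvWitness_subsample_last_py : List (List Int) × Int := ([[0, 5], [3, 6], [1, 7], [10, 8]], 4)

def Spec_subsample_last_py (data : List (List Int)) (interval : Int) (out : List (List Int)) : Prop := out = subsample_last_py_alt data interval
instance (data : List (List Int)) (interval : Int) (out : List (List Int)) : Decidable (Spec_subsample_last_py data interval out) := by unfold Spec_subsample_last_py; infer_instance

-- ===== CLAIM (what is proved, stated in full; the proofs are below) =====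
def Claim_equal_subsample_last_py : Prop := ∀ (data : List (List Int)) (interval : Int), Dom_subsample_last_py data interval → Pre_subsample_last_py data interval → Spec_subsample_last_py data interval (subsample_last_py data interval)

-- ===== LEMMAS AND PROOFS =====

-- membership in the inserted list
theorem mem_pvInsB {key : Int} {row : List Int} {acc : List (Int × List Int)} {x : Int × List Int}
    (h : x ∈ pvInsB key row acc) : x = (key, row) ∨ x ∈ acc := by
  induction acc with
  | nil => simpa [pvInsB] using h
  | cons p rest ih =>
    obtain ⟨k, r⟩ := p
    simp only [pvInsB] at h
    split_ifs at h with h1 h2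
    · rcases List.mem_cons.1 h with h | h
      · exact Or.inr (List.mem_cons.2 (Or.inl h))
      · rcases ih h with h | h
        · exact Or.inl h
        · exact Or.inr (List.mem_cons.2 (Or.inr h))
    · rcases List.mem_cons.1 h with h | h
      · exact Or.inl h
      · exact Or.inr (List.mem_cons.2 (Or.inr h))
    · rcases List.mem_cons.1 h with h | h
      · exact Or.inl h
      · exact Or.inr h

-- pvInsB preserves strict sortedness by key
theorem pairwise_pvInsB {key : Int} {row : List Int} {acc : List (Int × List Int)}
    (h : acc.Pairwise (fun a b => a.1 < b.1)) :
    (pvInsB key row acc).Pairwise (fun a b => a.1 < b.1) := by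
  induction acc with
  | nil => simp [pvInsB]
  | cons p rest ih =>
    obtain ⟨k, r⟩ := p
    rcases List.pairwise_cons.1 h with ⟨hhead, htail⟩
    simp only [pvInsB]
    split_ifs with h1 h2
    · refine List.pairwise_cons.2 ⟨?_, ih htail⟩
      intro x hx
      rcases mem_pvInsB hx with rfl | hx
      · exact h1
      · exact hhead x hx
    · subst h2; exact List.pairwise_cons.2 ⟨hhead, htail⟩
    · refine List.pairwise_cons.2 ⟨?_, h⟩
      intro x hx
      rcases List.mem_cons.1 hx with rfl | hx
      · omega
      · exact lt_trans (by omega) (hhead x hx)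

-- lookup after pvInsB is overwrite at key
theorem lookup_pvInsB (key : Int) (row : List Int) (acc : List (Int × List Int)) (j : Int) :
    (pvInsB key row acc).lookup j = if j = key then some row else acc.lookup j := by
  induction acc with
  | nil =>
    by_cases h : j = key
    · simp [pvInsB, h]
    · have hb : (j == key) = false := by simp [h]
      simp [pvInsB, List.lookup, hb, h]
  | cons p rest ih =>
    obtain ⟨k, r⟩ := p
    by_cases h1 : k < key
    · rw [show pvInsB key row ((k, r) :: rest) = (k, r) :: pvInsB key row rest from by
        simp [pvInsB, h1]]
      by_cases hjk : j = k
      · subst hjk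
        rw [if_neg (by omega)]
        simp [List.lookup]
      · have hb : (j == k) = false := by simp [hjk]
        simp [List.lookup, hb, ih]
    · by_cases h2 : k = key
      · subst h2
        rw [show pvInsB k row ((k, r) :: rest) = (k, row) :: rest from by simp [pvInsB]]
        by_cases hj : j = k
        · subst hj; simp [List.lookup]
        · have hb : (j == k) = false := by simp [hj]
          simp [List.lookup, hb, hj]
      · rw [show pvInsB key row ((k, r) :: rest) = (key, row) :: (k, r) :: rest from by
          simp [pvInsB, h1, h2]]
        by_cases hj : j = key
        · subst hj; simp [List.lookup]
        · have hb : (j == key) = false := by simp [hj]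
          simp [List.lookup, hb, hj]

-- loop invariant: after folding any list of rows, the dict of A and the sorted assoc list of B
-- agree as finite maps, and B's list stays strictly sorted
theorem fold_invariant (f : List Int → Int) (rows : List (List Int))
    (d : PySem.Dict Int (List Int)) (acc : List (Int × List Int))
    (hs : acc.Pairwise (fun a b => a.1 < b.1))
    (hag : ∀ j, d.get? j = acc.lookup j) :
    (rows.foldl (fun acc row => pvInsB (f row) row acc) acc).Pairwise (fun a b => a.1 < b.1) ∧
    ∀ j, (rows.foldl (fun d row => d.insert (f row) row) d).get? j
        = (rows.foldl (fun acc row => pvInsB (f row) row acc) acc).lookup j := by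
  induction rows generalizing d acc with
  | nil => exact ⟨hs, hag⟩
  | cons row rest ih =>
    simp only [List.foldl_cons]
    refine ih (d.insert (f row) row) (pvInsB (f row) row acc) (pairwise_pvInsB hs) ?_
    intro j
    rw [lookup_pvInsB]
    by_cases hj : j = f row
    · subst hj; simp [PySem.Dict.get?_insert_self]
    · rw [PySem.Dict.get?_insert_of_ne _ _ hj, hag j, if_neg hj]

-- on a strictly key-sorted assoc list, each member is found by lookup
theorem lookup_eq_some_of_mem {acc : List (Int × List Int)}
    (hs : acc.Pairwise (fun a b => a.1 < b.1)) {p : Int × List Int} (hp : p ∈ acc) :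
    acc.lookup p.1 = some p.2 := by
  induction acc with
  | nil => cases hp
  | cons q rest ih =>
    obtain ⟨k, r⟩ := q
    rcases List.pairwise_cons.1 hs with ⟨hhead, htail⟩
    rcases List.mem_cons.1 hp with rfl | hp
    · simp [List.lookup]
    · have hne : p.1 ≠ k := by have := hhead p hp; omega
      have hb : (p.1 == k) = false := by simp [hne]
      simp [List.lookup, hb, ih htail hp]

-- lookup finds a key exactly when it occurs as a first component
theorem lookup_isSome_iff (acc : List (Int × List Int)) (j : Int) :
    (acc.lookup j).isSome ↔ j ∈ acc.map Prod.fst := by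
  induction acc with
  | nil => simp [List.lookup]
  | cons p rest ih =>
    obtain ⟨k, r⟩ := p
    by_cases h : j = k
    · simp [List.lookup, h]
    · have hb : (j == k) = false := by simp [h]
      simp [List.lookup, hb, ih, h]

-- the whole computation after the guard, for an arbitrary key function
theorem main_eq (f : List Int → Int) (rows : List (List Int)) :
    (PySem.List.sorted
        (rows.foldl (fun (d : PySem.Dict Int (List Int)) row => d.insert (f row) row)
          PySem.Dict.empty).keys (fun x => x) false).foldl
      (fun acc k => acc ++
        [(rows.foldl (fun (d : PySem.Dict Int (List Int)) row => d.insert (f row) row)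
            PySem.Dict.empty).getD k []]) []
    = (rows.foldl (fun acc row => pvInsB (f row) row acc) []).map (·.2) := by
  obtain ⟨hs, hag⟩ := fold_invariant f rows PySem.Dict.empty []
    (by simp) (by intro j; simp [PySem.Dict.get?_empty, List.lookup])
  set d := rows.foldl (fun (d : PySem.Dict Int (List Int)) row => d.insert (f row) row)
    PySem.Dict.empty with hd
  set acc := rows.foldl (fun acc row => pvInsB (f row) row acc) [] with hacc
  have hnd : d.keys.Nodup := by
    rw [hd]
    exact PySem.Dict.nodup_keys_foldl_insert_key rows f (fun _ row => row) PySem.Dict.empty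
      (by simp [PySem.Dict.keys_empty])
  have hmn : (acc.map Prod.fst).Nodup := by
    have := List.pairwise_map.2 hs
    exact this.imp (fun h => ne_of_lt h)
  have hperm : (acc.map Prod.fst).Perm d.keys := by
    refine (List.perm_ext_iff_of_nodup hmn hnd).2 ?_
    intro j
    have h2 : (d.get? j).isSome ↔ j ∈ d.keys := by
      rw [Option.isSome_iff_ne_none, ne_eq, PySem.Dict.get?_eq_none_iff_not_mem_keys, not_not]
    rw [← lookup_isSome_iff, ← hag j, h2]
  have hsorted : PySem.List.sorted d.keys (fun x => x) false = acc.map Prod.fst :=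
    PySem.List.sorted_eq_of_perm_of_pairwise_lt d.keys (acc.map Prod.fst) (fun x => x) hperm
      (List.pairwise_map.2 (hs.imp (fun h => h)))
  rw [hsorted, PySem.List.foldl_append_singleton_eq_map, List.nil_append, List.map_map]
  refine List.map_congr_left ?_
  intro p hp
  simp only [Function.comp]
  rw [PySem.Dict.getD_eq_get?_getD, hag p.1, lookup_eq_some_of_mem hs hp, Option.getD_some]

-- ===== VERDICT (by name: the statement is the Claim_ definition above) =====
theorem subsample_last_py_spec : Claim_equal_subsample_last_py := by
  intro data interval _ _
  unfold Spec_subsample_last_py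
  by_cases hd : data = []
  · simp [subsample_last_py, subsample_last_py_alt, hd]
  · simp only [subsample_last_py, subsample_last_py_alt, if_neg hd]
    exact main_eq _ data
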